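-- pv_equiv track=rewrite | github.com/Lundii1/GemmaEvolve | experiments/erdos_problem_19_seed.py | _best_merge_candidate
-- ===== SOURCE A (Python) =====
-- CaseDesign = tuple[tuple[int, ...], ...]
--
-- def _used_clique_pairs(design: CaseDesign) -> set[tuple[int, int]]:
--     pairs: set[tuple[int, int]] = set()
--     for membership in design:
--         for offset, left in enumerate(membership):
--             for right in membership[offset + 1 :]:
--                 pairs.add((left, right))
--     return pairs
--
-- def _best_merge_candidate(
--     design: CaseDesign,
--     max_block_size: int,
-- ) -> tuple[int, int, tuple[int, ...]] | None:
--     pairs_used = _used_clique_pairs(design)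
--     best_candidate: tuple[int, int, tuple[int, ...]] | None = None
--     best_key: tuple[int, int, int, tuple[int, ...]] | None = None
--     for left_index, left_membership in enumerate(design):
--         left_set = set(left_membership)
--         for right_index in range(left_index + 1, len(design)):
--             right_membership = design[right_index]
--             if left_set.intersection(right_membership):
--                 continue
--             merged_size = len(left_membership) + len(right_membership)
--             if merged_size > max_block_size:
--                 continue
--             cross_pair_count = 0
--             invalid = False
--             for left_clique in left_membership:
--                 for right_clique in right_membership:
--                     pair = (
--                         (left_clique, right_clique)
--                         if left_clique < right_clique
--                         else (right_clique, left_clique)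
--                     )
--                     if pair in pairs_used:
--                         invalid = True
--                         break
--                     cross_pair_count += 1
--                 if invalid:
--                     break
--             if invalid:
--                 continue
--             merged_membership = tuple(sorted(left_membership + right_membership))
--             candidate_key = (
--                 cross_pair_count,
--                 merged_size,
--                 min(len(left_membership), len(right_membership)),
--                 tuple(-clique for clique in merged_membership),
--             )
--             if best_key is None or candidate_key > best_key:
--                 best_key = candidate_key
--                 best_candidate = (left_index, right_index, merged_membership)
--     return best_candidate
-- ===== SOURCE B (Python) =====
-- def _rank_key(design, ij):
--     i, j = ij
--     left, right = design[i], design[j]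
--     merged = sorted(left + right)
--     return (
--         -(len(left) * len(right)),
--         -(len(left) + len(right)),
--         -min(len(left), len(right)),
--         *merged,
--         i,
--         j,
--     )
--
--
-- def _best_merge_candidate(design, max_block_size):
--     # Pairs of cliques already sharing a block, as (earlier, later) occurrences.
--     pairs_used = {
--         (m[i], m[j])
--         for m in design
--         for i in range(len(m))
--         for j in range(i + 1, len(m))
--     }
--     n = len(design)
--     # Rank every block pair best-first (the score only negated into a flat int
--     # tuple, ties broken by the index pair) and return the first mergeable one.
--     ranked = sorted(
--         ((i, j) for i in range(n) for j in range(i + 1, n)),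
--         key=lambda ij: _rank_key(design, ij),
--     )
--     for i, j in ranked:
--         left, right = design[i], design[j]
--         if not set(left).isdisjoint(right):
--             continue
--         if len(left) + len(right) > max_block_size:
--             continue
--         if any((min(a, b), max(a, b)) in pairs_used for a in left for b in right):
--             continue
--         return (i, j, tuple(sorted(left + right)))
--     return None
-- ===== Notes on version B (the rewrite author's own statement) =====
-- stated objective: alternative
-- what changed: B is sort-then-scan instead of scan-and-track-best: it ranks all index pairs once by a flattened negated score tuple (score first, index pair as tie-break) and returns the first pair of the ranked stream that passes the disjointness/size/conflict checks, with an early exit and no best/best_key accumulator or counting loop; the used-pair set is built by a comprehension over index pairs.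
import Mathlib
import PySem

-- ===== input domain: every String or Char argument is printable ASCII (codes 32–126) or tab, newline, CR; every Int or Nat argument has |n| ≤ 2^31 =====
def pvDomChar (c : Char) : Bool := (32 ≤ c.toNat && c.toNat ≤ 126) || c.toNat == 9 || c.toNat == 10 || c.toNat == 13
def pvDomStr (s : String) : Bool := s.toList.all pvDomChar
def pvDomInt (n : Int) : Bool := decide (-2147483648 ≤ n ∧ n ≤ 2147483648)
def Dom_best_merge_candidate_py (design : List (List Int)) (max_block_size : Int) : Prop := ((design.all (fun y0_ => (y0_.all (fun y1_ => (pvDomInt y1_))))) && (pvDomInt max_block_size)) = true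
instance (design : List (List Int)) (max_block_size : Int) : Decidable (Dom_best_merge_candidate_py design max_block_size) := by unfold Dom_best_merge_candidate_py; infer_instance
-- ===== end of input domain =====

-- B is sort-then-scan instead of scan-and-track-best: it ranks all index pairs once by a
-- flattened negated score key (tie-broken by the index pair) and returns the first ranked
-- pair passing the disjointness/size/conflict checks (objective: alternative algorithm).


-- Python's `>` on A's candidate-key 4-tuples (last components int tuples, lexicographic
-- with the prefix rule).
def pyListLt : List Int → List Int → Bool
  | [], [] => false
  | [], _ :: _ => true
  | _ :: _, [] => false
  | x :: xs, y :: ys => if x < y then true else if y < x then false else pyListLt xs ys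

def pyKeyGt (a b : Int × Int × Int × List Int) : Bool :=
  if b.1 < a.1 then true else if a.1 < b.1 then false
  else if b.2.1 < a.2.1 then true else if a.2.1 < b.2.1 then false
  else if b.2.2.1 < a.2.2.1 then true else if a.2.2.1 < b.2.2.1 then false
  else pyListLt b.2.2.2 a.2.2.2

-- ===== PORT A =====

-- _used_clique_pairs: a set of (earlier, later) occurrence pairs inside each block
def usedCliquePairs (design : List (List Int)) : PySem.Set (Int × Int) :=
  design.foldl
    (fun pairs membership =>
      (PySem.List.enumerate membership).foldl
        (fun pairs p =>
          (PySem.List.slice membership (some (p.1 + 1)) none).foldl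
            (fun pairs r => PySem.Set.add pairs (p.2, r)) pairs)
        pairs)
    PySem.Set.empty

-- `(l, r) if l < r else (r, l)`
def pairOf (l r : Int) : Int × Int := if l < r then (l, r) else (r, l)

-- the inner `for right_clique in right_membership` loop (with its break)
def crossInner (pairs : PySem.Set (Int × Int)) (l : Int) : List Int → Int → Bool × Int
  | [], c => (false, c)
  | r :: rs, c =>
    if PySem.Set.contains pairs (pairOf l r) then (true, c)
    else crossInner pairs l rs (c + 1)

-- the `for left_clique in left_membership` loop (with its break)
def crossLoop (pairs : PySem.Set (Int × Int)) (right : List Int) :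
    List Int → Int → Bool × Int
  | [], c => (false, c)
  | l :: ls, c =>
    match crossInner pairs l right c with
    | (true, c') => (true, c')
    | (false, c') => crossLoop pairs right ls c'

-- body of A's inner `for right_index in range(...)` loop
def stepA (design : List (List Int)) (pairs_used : PySem.Set (Int × Int))
    (max_block_size left_index : Int) (left : List Int) (left_set : PySem.Set Int)
    (right_index : Int)
    (st : Option (Int × Int × List Int) × Option (Int × Int × Int × List Int)) :
    Option (Int × Int × List Int) × Option (Int × Int × Int × List Int) :=
  let right := PySem.List.pyGetD design right_index []
  if !(PySem.Set.inter left_set right).isEmpty then st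
  else
    let merged_size := PySem.List.len left + PySem.List.len right
    if merged_size > max_block_size then st
    else
      match crossLoop pairs_used right left 0 with
      | (true, _) => st
      | (false, cross_pair_count) =>
        let merged := PySem.List.sorted (left ++ right) (fun x => x)
        let key := (cross_pair_count, merged_size,
          min (PySem.List.len left) (PySem.List.len right), merged.map (fun c => -c))
        match st.2 with
        | none => (some (left_index, right_index, merged), some key)
        | some bk =>
          if pyKeyGt key bk then (some (left_index, right_index, merged), some key) else st

def best_merge_candidate_py (design : List (List Int)) (max_block_size : Int) :
    Option (Int × Int × List Int) :=
  let pairs_used := usedCliquePairs design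
  ((PySem.List.enumerate design).foldl
    (fun st p =>
      let left_set := PySem.Set.ofList p.2
      (PySem.List.pyRange (p.1 + 1) (PySem.List.len design) 1).foldl
        (fun st right_index =>
          stepA design pairs_used max_block_size p.1 p.2 left_set right_index st)
        st)
    ((none, none) : Option (Int × Int × List Int) × Option (Int × Int × Int × List Int))).1

-- ===== PORT B =====

-- _rank_key: (-(|L|*|R|), -(|L|+|R|), -min(|L|,|R|), *merged, i, j) as a flat int tuple
def rankKey (design : List (List Int)) (ij : Int × Int) : List Int :=
  let left := PySem.List.pyGetD design ij.1 []
  let right := PySem.List.pyGetD design ij.2 []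
  let merged := PySem.List.sorted (left ++ right) (fun x => x)
  [-(PySem.List.len left * PySem.List.len right),
   -(PySem.List.len left + PySem.List.len right),
   -(min (PySem.List.len left) (PySem.List.len right))] ++ merged ++ [ij.1, ij.2]

-- the pairs_used set comprehension
def usedPairsB (design : List (List Int)) : PySem.Set (Int × Int) :=
  design.foldl
    (fun pairs m =>
      (PySem.List.pyRange 0 (PySem.List.len m) 1).foldl
        (fun pairs i =>
          (PySem.List.pyRange (i + 1) (PySem.List.len m) 1).foldl
            (fun pairs j =>
              PySem.Set.add pairs (PySem.List.pyGetD m i 0, PySem.List.pyGetD m j 0))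
            pairs)
        pairs)
    PySem.Set.empty

-- the generator ((i, j) for i in range(n) for j in range(i + 1, n))
def idxPairs (n : Int) : List (Int × Int) :=
  (PySem.List.pyRange 0 n 1).flatMap
    (fun i => (PySem.List.pyRange (i + 1) n 1).map (fun j => (i, j)))

-- the `for i, j in ranked:` loop with its three continue-checks and early return
def scanB (design : List (List Int)) (pairs_used : PySem.Set (Int × Int))
    (max_block_size : Int) : List (Int × Int) → Option (Int × Int × List Int)
  | [] => none
  | p :: rest =>
    let left := PySem.List.pyGetD design p.1 []
    let right := PySem.List.pyGetD design p.2 []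
    if !(PySem.Set.isdisjoint (PySem.Set.ofList left) right) then
      scanB design pairs_used max_block_size rest
    else if PySem.List.len left + PySem.List.len right > max_block_size then
      scanB design pairs_used max_block_size rest
    else if left.any (fun a => right.any (fun b =>
        PySem.Set.contains pairs_used (min a b, max a b))) then
      scanB design pairs_used max_block_size rest
    else some (p.1, p.2, PySem.List.sorted (left ++ right) (fun x => x))

def best_merge_candidate_py_alt (design : List (List Int)) (max_block_size : Int) :
    Option (Int × Int × List Int) :=
  let pairs_used := usedPairsB design
  let ranked := PySem.List.sorted (idxPairs (PySem.List.len design)) (rankKey design)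
  scanB design pairs_used max_block_size ranked

-- ===== PRECONDITION & SPEC =====
def Spec_best_merge_candidate_py (design : List (List Int)) (max_block_size : Int) (out : Option (Int × Int × List Int)) : Prop := out = best_merge_candidate_py_alt design max_block_size
instance (design : List (List Int)) (max_block_size : Int) (out : Option (Int × Int × List Int)) : Decidable (Spec_best_merge_candidate_py design max_block_size out) := by unfold Spec_best_merge_candidate_py; infer_instance

-- ===== CLAIM =====
def Claim_equal_best_merge_candidate_py : Prop := ∀ (design : List (List Int)) (max_block_size : Int), Dom_best_merge_candidate_py design max_block_size → Spec_best_merge_candidate_py design max_block_size (best_merge_candidate_py design max_block_size)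

-- ===== LEMMAS AND PROOFS =====
-- ===== proof-layer: order facts on List Int =====

-- lexicographic split across an equal-length prefix
lemma listlt_split (u : List Int) (v s t : List Int) (h : u.length = v.length) :
    (u ++ s < v ++ t) ↔ (u < v ∨ (u = v ∧ s < t)) := by
  induction u generalizing v with
  | nil =>
    cases v with
    | nil => simp
    | cons b bs => simp at h
  | cons a as ih =>
    cases v with
    | nil => simp at h
    | cons b bs =>
      simp only [List.length_cons] at h
      simp only [List.cons_append, List.cons_lt_cons_iff, ih bs (by omega),
        List.cons.injEq]
      constructor
      · rintro (h1 | ⟨h1, h2 | ⟨h2, h3⟩⟩)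
        · tauto
        · tauto
        · tauto
      · rintro ((h1 | ⟨h1, h2⟩) | ⟨⟨h1, h2⟩, h3⟩)
        · tauto
        · tauto
        · subst h1 h2; tauto

-- pyListLt on negated equal-length lists is the reversed comparison
lemma pyListLt_neg (u v : List Int) (h : u.length = v.length) :
    pyListLt (v.map (fun c => -c)) (u.map (fun c => -c)) = decide (u < v) := by
  induction u generalizing v with
  | nil =>
    cases v with
    | nil => simp [pyListLt]
    | cons b bs => simp at h
  | cons a as ih =>
    cases v with
    | nil => simp at h
    | cons b bs =>
      simp only [List.length_cons] at h
      simp only [List.map_cons, pyListLt]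
      rw [ih bs (by omega)]
      by_cases h1 : a < b
      · have h2 : (-b : Int) < -a := by omega
        simp [h1, h2, List.cons_lt_cons_iff]
      · by_cases h2 : b < a
        · have h3 : ¬ ((-b : Int) < -a) := by omega
          have h4 : (-a : Int) < -b := by omega
          simp [h1, h3, h4, List.cons_lt_cons_iff]
          omega
        · have : a = b := by omega
          subst this
          simp

-- ===== proof-layer: the shared score vocabulary =====

def Lof (design : List (List Int)) (p : Int × Int) : List Int := PySem.List.pyGetD design p.1 []
def Rof (design : List (List Int)) (p : Int × Int) : List Int := PySem.List.pyGetD design p.2 []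
def mergedOf (design : List (List Int)) (p : Int × Int) : List Int :=
  PySem.List.sorted (Lof design p ++ Rof design p) (fun x => x)
def key4 (design : List (List Int)) (p : Int × Int) : Int × Int × Int × List Int :=
  (PySem.List.len (Lof design p) * PySem.List.len (Rof design p),
   PySem.List.len (Lof design p) + PySem.List.len (Rof design p),
   min (PySem.List.len (Lof design p)) (PySem.List.len (Rof design p)),
   (mergedOf design p).map (fun c => -c))
def coreOf (design : List (List Int)) (p : Int × Int) : List Int :=
  [-(PySem.List.len (Lof design p) * PySem.List.len (Rof design p)),
   -(PySem.List.len (Lof design p) + PySem.List.len (Rof design p)),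
   -(min (PySem.List.len (Lof design p)) (PySem.List.len (Rof design p)))] ++ mergedOf design p
def candOf (design : List (List Int)) (p : Int × Int) : Int × Int × List Int :=
  (p.1, p.2, mergedOf design p)
def posLt (p q : Int × Int) : Prop := p.1 < q.1 ∨ (p.1 = q.1 ∧ p.2 < q.2)

lemma rankKey_eq (design : List (List Int)) (p : Int × Int) :
    rankKey design p = coreOf design p ++ [p.1, p.2] := by
  simp [rankKey, coreOf, mergedOf, Lof, Rof]

lemma merged_length (design : List (List Int)) (p : Int × Int) :
    (mergedOf design p).length = (Lof design p).length + (Rof design p).length := by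
  rw [mergedOf, (PySem.List.sorted_perm (Lof design p ++ Rof design p) (fun x => x) false).length_eq,
    List.length_append]

lemma keyGt_eq (design : List (List Int)) (p q : Int × Int) :
    pyKeyGt (key4 design p) (key4 design q) = decide (coreOf design p < coreOf design q) := by
  unfold pyKeyGt key4 coreOf
  simp only [List.cons_append, List.nil_append, List.cons_lt_cons_iff]
  set ap := PySem.List.len (Lof design p) * PySem.List.len (Rof design p) with hap
  set aq := PySem.List.len (Lof design q) * PySem.List.len (Rof design q) with haq
  set bp := PySem.List.len (Lof design p) + PySem.List.len (Rof design p) with hbp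
  set bq := PySem.List.len (Lof design q) + PySem.List.len (Rof design q) with hbq
  set cp := min (PySem.List.len (Lof design p)) (PySem.List.len (Rof design p)) with hcp
  set cq := min (PySem.List.len (Lof design q)) (PySem.List.len (Rof design q)) with hcq
  by_cases h1 : aq < ap
  · have : (-ap : Int) < -aq := by omega
    simp [h1, this]
  · by_cases h2 : ap < aq
    · have h3 : ¬ ((-ap : Int) < -aq) := by omega
      have h4 : ¬ (-ap : Int) = -aq := by omega
      simp [h1, h2, h3, h4]
    · have hae : ap = aq := by omega
      by_cases h5 : bq < bp
      · have hx : (-bp : Int) < -bq := by omega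
        simp [hae, hx]
        exact Or.inl h5
      · by_cases h6 : bp < bq
        · have h7 : ¬ ((-bp : Int) < -bq) := by omega
          have h8 : ¬ (-bp : Int) = -bq := by omega
          simp [h5, h6, h7, h8, hae]
        · have hbe : bp = bq := by omega
          by_cases h9 : cq < cp
          · have hx : (-cp : Int) < -cq := by omega
            simp [hae, hbe, hx]
            exact Or.inl h9
          · by_cases h10 : cp < cq
            · have h11 : ¬ ((-cp : Int) < -cq) := by omega
              have h12 : ¬ (-cp : Int) = -cq := by omega
              simp [h9, h10, h11, h12, hae, hbe]
            · have hce : cp = cq := by omega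
              have hlen : (mergedOf design q).length = (mergedOf design p).length := by
                rw [merged_length, merged_length]
                simp only [PySem.List.len_eq, hbp, hbq] at hbe
                omega
              rw [pyListLt_neg (mergedOf design p) (mergedOf design q) hlen.symm]
              simp [hae, hbe, hce]

lemma pos_iff (p q : Int × Int) : ([p.1, p.2] : List Int) < [q.1, q.2] ↔ posLt p q := by
  simp [List.cons_lt_cons_iff, posLt]

lemma rank_lt_iff (design : List (List Int)) (p q : Int × Int) :
    rankKey design p < rankKey design q ↔
      (coreOf design p < coreOf design q ∨
        (coreOf design p = coreOf design q ∧ ([p.1, p.2] : List Int) < [q.1, q.2])) := by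
  by_cases hlen : (mergedOf design p).length = (mergedOf design q).length
  · rw [rankKey_eq, rankKey_eq]
    exact listlt_split _ _ _ _ (by simp [coreOf, hlen])
  · have hbne : -(PySem.List.len (Lof design p) + PySem.List.len (Rof design p)) ≠
        -(PySem.List.len (Lof design q) + PySem.List.len (Rof design q)) := by
      have h1 := merged_length design p
      have h2 := merged_length design q
      simp only [PySem.List.len_eq]
      omega
    simp only [rankKey_eq, coreOf, List.cons_append, List.nil_append,
      List.cons_lt_cons_iff, List.cons.injEq]
    constructor
    · rintro (h | ⟨h1, h2 | ⟨h2, h3⟩⟩)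
      · tauto
      · tauto
      · exact absurd h2 hbne
    · rintro ((h | ⟨h1, h2 | ⟨h2, h3⟩⟩) | ⟨⟨h1, h2, h3⟩, h4⟩)
      · tauto
      · tauto
      · exact absurd h2 hbne
      · exact absurd h2 hbne

lemma rank_inj (design : List (List Int)) (p q : Int × Int)
    (h : rankKey design p = rankKey design q) : p = q := by
  simp only [rankKey_eq, coreOf, List.cons_append, List.nil_append, List.cons.injEq] at h
  obtain ⟨h1, h2, h3, h4⟩ := h
  have hlen : (mergedOf design p).length = (mergedOf design q).length := by
    have e1 := merged_length design p
    have e2 := merged_length design q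
    simp only [PySem.List.len_eq] at h2
    omega
  obtain ⟨-, h5⟩ := List.append_inj h4 hlen
  simp only [List.cons.injEq] at h5
  exact Prod.ext h5.1 h5.2.1

lemma GT_iff (design : List (List Int)) (p q : Int × Int) (hpos : posLt q p) :
    pyKeyGt (key4 design p) (key4 design q) = decide (rankKey design p < rankKey design q) := by
  rw [keyGt_eq]
  apply decide_eq_decide.mpr
  rw [rank_lt_iff]
  constructor
  · exact Or.inl
  · rintro (h | ⟨he, hl⟩)
    · exact h
    · rw [pos_iff] at hl
      rcases hl with h1 | ⟨h1, h2⟩ <;> rcases hpos with h3 | ⟨h3, h4⟩ <;> omega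

-- ===== proof-layer: the two pairs_used sets hold the same pairs =====

lemma mem_foldl_add {β : Type} (f : β → Int × Int) (l : List β)
    (s : PySem.Set (Int × Int)) (x : Int × Int) :
    x ∈ l.foldl (fun s r => PySem.Set.add s (f r)) s ↔ x ∈ s ∨ ∃ r ∈ l, x = f r := by
  induction l generalizing s with
  | nil => simp
  | cons r rs ih =>
    simp only [List.foldl_cons, ih, PySem.Set.mem_add, List.mem_cons]
    constructor
    · rintro (⟨h | h⟩ | ⟨r', hr', he⟩)
      · exact Or.inl h
      · exact Or.inr ⟨r, Or.inl rfl, h⟩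
      · exact Or.inr ⟨r', Or.inr hr', he⟩
    · rintro (h | ⟨r', (rfl | hr'), he⟩)
      · exact Or.inl (Or.inl h)
      · exact Or.inl (Or.inr he)
      · exact Or.inr ⟨r', hr', he⟩

lemma mem_foldl_double {β γ : Type} (l1 : List β) (g : β → List γ) (f : β → γ → Int × Int)
    (s : PySem.Set (Int × Int)) (x : Int × Int) :
    x ∈ l1.foldl (fun s a => (g a).foldl (fun s b => PySem.Set.add s (f a b)) s) s ↔
      x ∈ s ∨ ∃ a ∈ l1, ∃ b ∈ g a, x = f a b := by
  induction l1 generalizing s with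
  | nil => simp
  | cons a as ih =>
    simp only [List.foldl_cons, ih, mem_foldl_add, List.mem_cons]
    constructor
    · rintro (⟨h | ⟨b, hb, he⟩⟩ | ⟨a', ha', b, hb, he⟩)
      · exact Or.inl h
      · exact Or.inr ⟨a, Or.inl rfl, b, hb, he⟩
      · exact Or.inr ⟨a', Or.inr ha', b, hb, he⟩
    · rintro (h | ⟨a', (rfl | ha'), b, hb, he⟩)
      · exact Or.inl (Or.inl h)
      · exact Or.inl (Or.inr ⟨b, hb, he⟩)
      · exact Or.inr ⟨a', ha', b, hb, he⟩

lemma mem_foldl_triple {β0 β1 γ : Type} (l0 : List β0) (g1 : β0 → List β1)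
    (g2 : β0 → β1 → List γ) (f : β0 → β1 → γ → Int × Int)
    (s : PySem.Set (Int × Int)) (x : Int × Int) :
    x ∈ l0.foldl (fun s m => (g1 m).foldl
        (fun s a => (g2 m a).foldl (fun s b => PySem.Set.add s (f m a b)) s) s) s ↔
      x ∈ s ∨ ∃ m ∈ l0, ∃ a ∈ g1 m, ∃ b ∈ g2 m a, x = f m a b := by
  induction l0 generalizing s with
  | nil => simp
  | cons m ms ih =>
    simp only [List.foldl_cons, ih, mem_foldl_double, List.mem_cons]
    constructor
    · rintro (⟨h | hh⟩ | ⟨m', hm', rest⟩)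
      · exact Or.inl h
      · exact Or.inr ⟨m, Or.inl rfl, hh⟩
      · exact Or.inr ⟨m', Or.inr hm', rest⟩
    · rintro (h | ⟨m', (rfl | hm'), rest⟩)
      · exact Or.inl (Or.inl h)
      · exact Or.inl (Or.inr rest)
      · exact Or.inr ⟨m', hm', rest⟩

-- a pair is in a per-block contribution iff it is (m[i], m[j]) with i < j
lemma mem_usedA_iff (design : List (List Int)) (x : Int × Int) :
    x ∈ usedCliquePairs design ↔
      ∃ m ∈ design, ∃ (i j : Nat), i < j ∧ j < m.length ∧
        m[i]? = some x.1 ∧ m[j]? = some x.2 := by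
  unfold usedCliquePairs
  rw [mem_foldl_triple]
  simp only [PySem.Set.empty, List.not_mem_nil, false_or]
  constructor
  · rintro ⟨m, hm, p, hp, r, hr, he⟩
    rw [PySem.List.mem_enumerate_iff] at hp
    obtain ⟨k, hk, rfl⟩ := hp
    rw [PySem.List.slice_from _ (by omega : (0:Int) ≤ 0 + ↑k + 1)] at hr
    have htn : ((0 + (k : Int) + 1)).toNat = k + 1 := by omega
    rw [htn] at hr
    rw [List.mem_drop_iff_getElem] at hr
    obtain ⟨j', hj', he'⟩ := hr
    subst he
    refine ⟨m, hm, k, k + 1 + j', by omega, by omega, ?_, ?_⟩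
    · simp [hk]
    · rw [List.getElem?_eq_getElem (by omega)]
      rw [← he']
  · rintro ⟨m, hm, i, j, hij, hj, hx1, hx2⟩
    have hi : i < m.length := by omega
    rw [List.getElem?_eq_getElem hi] at hx1
    rw [List.getElem?_eq_getElem hj] at hx2
    refine ⟨m, hm, ((i : Int), m[i]), ?_, m[j], ?_, ?_⟩
    · rw [PySem.List.mem_enumerate_iff]
      exact ⟨i, hi, by simp⟩
    · dsimp only
      rw [PySem.List.slice_from _ (by omega : (0:Int) ≤ (i:Int) + 1)]
      have htn : (((i : Int) + 1)).toNat = i + 1 := by omega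
      rw [htn, List.mem_drop_iff_getElem]
      exact ⟨j - (i + 1), by omega, by congr 1; omega⟩
    · have e1 : m[i] = x.1 := Option.some.inj hx1
      have e2 : m[j] = x.2 := Option.some.inj hx2
      exact Prod.ext (by simp [← e1]) (by simp [← e2])

lemma mem_usedB_iff (design : List (List Int)) (x : Int × Int) :
    x ∈ usedPairsB design ↔
      ∃ m ∈ design, ∃ (i j : Nat), i < j ∧ j < m.length ∧
        m[i]? = some x.1 ∧ m[j]? = some x.2 := by
  unfold usedPairsB
  rw [mem_foldl_triple]
  simp only [PySem.Set.empty, List.not_mem_nil, false_or]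
  constructor
  · rintro ⟨m, hm, i, hi, j, hj, he⟩
    rw [PySem.List.mem_pyRange_one] at hi hj
    rw [PySem.List.len_eq] at hi hj
    refine ⟨m, hm, i.toNat, j.toNat, by omega, by omega, ?_, ?_⟩
    · rw [he]
      dsimp only
      rw [List.getElem?_eq_getElem (show i.toNat < m.length by omega),
        PySem.List.pyGetD_eq_getElem m 0 (by omega) (by omega)]
    · rw [he]
      dsimp only
      rw [List.getElem?_eq_getElem (show j.toNat < m.length by omega),
        PySem.List.pyGetD_eq_getElem m 0 (by omega) (by omega)]
  · rintro ⟨m, hm, i, j, hij, hj, hx1, hx2⟩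
    rw [List.getElem?_eq_getElem (by omega : i < m.length)] at hx1
    rw [List.getElem?_eq_getElem hj] at hx2
    refine ⟨m, hm, (i : Int), ?_, (j : Int), ?_, ?_⟩
    · rw [PySem.List.mem_pyRange_one, PySem.List.len_eq]; omega
    · rw [PySem.List.mem_pyRange_one, PySem.List.len_eq]; omega
    · rw [PySem.List.pyGetD_eq_getElem m 0 (by omega : (0:Int) ≤ (i:Int)) (by omega)]
      rw [PySem.List.pyGetD_eq_getElem m 0 (by omega : (0:Int) ≤ (j:Int)) (by omega)]
      have e1 : m[i] = x.1 := Option.some.inj hx1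
      have e2 : m[j] = x.2 := Option.some.inj hx2
      exact Prod.ext (by simp [← e1]) (by simp [← e2])

lemma contains_used_eq (design : List (List Int)) (x : Int × Int) :
    PySem.Set.contains (usedCliquePairs design) x = PySem.Set.contains (usedPairsB design) x := by
  have h := (mem_usedA_iff design x).trans (mem_usedB_iff design x).symm
  exact Bool.eq_iff_iff.mpr
    (by rw [PySem.Set.contains_iff, PySem.Set.contains_iff]; exact h)

-- ===== proof-layer: A's step in canonical form =====

def goodB (design : List (List Int)) (max_block_size : Int) (p : Int × Int) : Bool :=
  PySem.Set.isdisjoint (PySem.Set.ofList (Lof design p)) (Rof design p) &&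
  !(decide (PySem.List.len (Lof design p) + PySem.List.len (Rof design p) > max_block_size)) &&
  !((Lof design p).any (fun a => (Rof design p).any (fun b =>
      PySem.Set.contains (usedPairsB design) (min a b, max a b))))

def enc (design : List (List Int)) :
    Option (Int × Int) → Option (Int × Int × List Int) × Option (Int × Int × Int × List Int)
  | none => (none, none)
  | some m => (some (candOf design m), some (key4 design m))

def stepC (design : List (List Int)) (max_block_size : Int)
    (st : Option (Int × Int × List Int) × Option (Int × Int × Int × List Int))
    (p : Int × Int) :
    Option (Int × Int × List Int) × Option (Int × Int × Int × List Int) :=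
  if goodB design max_block_size p then
    match st.2 with
    | none => (some (candOf design p), some (key4 design p))
    | some bk =>
      if pyKeyGt (key4 design p) bk then (some (candOf design p), some (key4 design p)) else st
  else st

def argStep (design : List (List Int)) (max_block_size : Int)
    (acc : Option (Int × Int)) (p : Int × Int) : Option (Int × Int) :=
  if goodB design max_block_size p then
    List.argAux (fun b c => rankKey design b < rankKey design c) acc p
  else acc

lemma crossInner_fst (pairs : PySem.Set (Int × Int)) (l : Int) (rs : List Int) (c : Int) :
    (crossInner pairs l rs c).1 = rs.any (fun r => PySem.Set.contains pairs (pairOf l r)) := by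
  induction rs generalizing c with
  | nil => simp [crossInner]
  | cons r rs ih =>
    simp only [crossInner, List.any_cons]
    cases h : PySem.Set.contains pairs (pairOf l r)
    · simp only [Bool.false_eq_true, if_false, Bool.false_or]
      exact ih (c + 1)
    · simp

lemma crossInner_snd (pairs : PySem.Set (Int × Int)) (l : Int) (rs : List Int) (c : Int)
    (h : rs.any (fun r => PySem.Set.contains pairs (pairOf l r)) = false) :
    (crossInner pairs l rs c).2 = c + rs.length := by
  induction rs generalizing c with
  | nil => simp [crossInner]
  | cons r rs ih =>
    simp only [List.any_cons, Bool.or_eq_false_iff] at h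
    simp only [crossInner, h.1, Bool.false_eq_true, if_false]
    rw [ih _ h.2]
    push_cast [List.length_cons]
    ring

lemma crossLoop_fst (pairs : PySem.Set (Int × Int)) (right ls : List Int) (c : Int) :
    (crossLoop pairs right ls c).1
      = ls.any (fun l => right.any (fun r => PySem.Set.contains pairs (pairOf l r))) := by
  induction ls generalizing c with
  | nil => simp [crossLoop]
  | cons l ls ih =>
    simp only [crossLoop, List.any_cons]
    have hfst := crossInner_fst pairs l right c
    rcases hx : crossInner pairs l right c with ⟨b, c2⟩
    rw [hx] at hfst
    simp only at hfst
    cases b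
    · rw [← hfst, Bool.false_or]
      exact ih c2
    · rw [← hfst, Bool.true_or]

lemma crossLoop_snd (pairs : PySem.Set (Int × Int)) (right ls : List Int) (c : Int)
    (h : ls.any (fun l => right.any (fun r => PySem.Set.contains pairs (pairOf l r))) = false) :
    (crossLoop pairs right ls c).2 = c + ls.length * right.length := by
  induction ls generalizing c with
  | nil => simp [crossLoop]
  | cons l ls ih =>
    simp only [List.any_cons, Bool.or_eq_false_iff] at h
    have hfst := crossInner_fst pairs l right c
    have hsnd := crossInner_snd pairs l right c h.1
    rcases hx : crossInner pairs l right c with ⟨b, c2⟩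
    rw [hx] at hfst hsnd
    simp only at hfst hsnd
    rw [h.1] at hfst
    subst hfst
    simp only [crossLoop, hx]
    rw [ih _ h.2, hsnd]
    push_cast [List.length_cons]
    ring

lemma pairOf_eq_minmax (l r : Int) : pairOf l r = (min l r, max l r) := by
  unfold pairOf
  split_ifs with h <;> simp [min_def, max_def] <;> omega

lemma inter_isEmpty_eq (xs ys : List Int) :
    (PySem.Set.inter (PySem.Set.ofList xs) ys).isEmpty
      = PySem.Set.isdisjoint (PySem.Set.ofList xs) ys := by
  rw [Bool.eq_iff_iff, List.isEmpty_iff, PySem.Set.isdisjoint_iff,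
    List.eq_nil_iff_forall_not_mem]
  simp only [PySem.Set.mem_inter, not_and]

lemma contains_pair_eq (design : List (List Int)) (a b : Int) :
    PySem.Set.contains (usedCliquePairs design) (pairOf a b)
      = PySem.Set.contains (usedPairsB design) (min a b, max a b) := by
  rw [pairOf_eq_minmax, contains_used_eq]

lemma stepA_eq_stepC (design : List (List Int)) (max_block_size i j : Int)
    (st : Option (Int × Int × List Int) × Option (Int × Int × Int × List Int)) :
    stepA design (usedCliquePairs design) max_block_size i
      (PySem.List.pyGetD design i []) (PySem.Set.ofList (PySem.List.pyGetD design i []))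
      j st = stepC design max_block_size st (i, j) := by
  simp only [stepA, stepC, goodB]
  rw [inter_isEmpty_eq]
  have hL : PySem.List.pyGetD design i [] = Lof design (i, j) := rfl
  have hR : PySem.List.pyGetD design j [] = Rof design (i, j) := rfl
  rw [hL, hR]
  by_cases hdis : PySem.Set.isdisjoint (PySem.Set.ofList (Lof design (i, j)))
      (Rof design (i, j)) = true
  · simp only [hdis]
    simp only [Bool.not_true, Bool.false_eq_true, if_false, Bool.true_and]
    by_cases hsz : PySem.List.len (Lof design (i, j)) + PySem.List.len (Rof design (i, j))
        > max_block_size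
    · rw [if_pos hsz]
      simp only [PySem.List.len_eq] at hsz
      simp
      intro hle
      exact absurd hle (by omega)
    · rw [if_neg hsz]
      simp only [hsz, decide_false, Bool.not_false, Bool.true_and]
      have hany :
          ((Lof design (i, j)).any (fun a => (Rof design (i, j)).any (fun b =>
              PySem.Set.contains (usedCliquePairs design) (pairOf a b))))
            = ((Lof design (i, j)).any (fun a => (Rof design (i, j)).any (fun b =>
                PySem.Set.contains (usedPairsB design) (min a b, max a b)))) := by
        simp only [contains_pair_eq]
      have hfst := crossLoop_fst (usedCliquePairs design) (Rof design (i, j))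
        (Lof design (i, j)) 0
      rcases hx : crossLoop (usedCliquePairs design) (Rof design (i, j))
          (Lof design (i, j)) 0 with ⟨b, cnt⟩
      rw [hx] at hfst
      cases b
      · rw [← hany, ← hfst]
        simp only [Bool.not_false, if_true]
        have hcnt := crossLoop_snd (usedCliquePairs design) (Rof design (i, j))
          (Lof design (i, j)) 0 hfst.symm
        rw [hx] at hcnt
        simp only at hcnt
        subst hcnt
        simp only [key4, candOf, mergedOf, PySem.List.len_eq, zero_add]
      · rw [← hany, ← hfst]
        simp
  · have hdis2 : PySem.Set.isdisjoint (PySem.Set.ofList (Lof design (i, j)))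
        (Rof design (i, j)) = false := Bool.eq_false_iff.mpr hdis
    simp only [hdis2]
    simp

-- ===== proof-layer: A as a fold over the flat index-pair list =====

lemma A_flat (design : List (List Int)) (max_block_size : Int) :
    best_merge_candidate_py design max_block_size
      = ((idxPairs (PySem.List.len design)).foldl (stepC design max_block_size)
          (none, none)).1 := by
  have h0 : best_merge_candidate_py design max_block_size
      = ((PySem.List.enumerate design).foldl
          (fun st p =>
            (PySem.List.pyRange (p.1 + 1) (PySem.List.len design) 1).foldl
              (fun st right_index =>
                stepA design (usedCliquePairs design) max_block_size p.1 p.2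
                  (PySem.Set.ofList p.2) right_index st) st)
          (none, none)).1 := rfl
  rw [h0, PySem.List.enumerate_eq_map_pyRange design ([] : List Int), List.foldl_map]
  unfold idxPairs
  rw [List.foldl_flatMap]
  congr 2
  funext st i
  rw [List.foldl_map]
  congr 1
  funext st j
  exact stepA_eq_stepC design max_block_size i j st

-- ===== proof-layer: the tracking fold computes the rank-minimal good pair =====

lemma AINV (design : List (List Int)) (max_block_size : Int) (l : List (Int × Int))
    (acc : Option (Int × Int)) (hpw : l.Pairwise posLt)
    (hacc : ∀ m, acc = some m → ∀ p ∈ l, posLt m p) :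
    l.foldl (stepC design max_block_size) (enc design acc)
      = enc design (l.foldl (argStep design max_block_size) acc) := by
  induction l generalizing acc with
  | nil => rfl
  | cons p rest ih =>
    rw [List.pairwise_cons] at hpw
    simp only [List.foldl_cons]
    by_cases hg : goodB design max_block_size p = true
    · cases acc with
      | none =>
        have h1 : stepC design max_block_size (enc design none) p = enc design (some p) := by
          simp [stepC, hg, enc]
        have h2 : argStep design max_block_size none p = some p := by
          simp [argStep, hg, List.argAux]
        rw [h1, h2]
        refine ih _ hpw.2 ?_
        intro m hm q hq
        cases Option.some.inj hm
        exact hpw.1 q hq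
      | some m =>
        have hpos : posLt m p := hacc m rfl p List.mem_cons_self
        have hgt := GT_iff design p m hpos
        have h1 : stepC design max_block_size (enc design (some m)) p
            = enc design (if rankKey design p < rankKey design m then some p else some m) := by
          simp only [stepC, hg, if_true, enc]
          rw [hgt]
          by_cases hlt : rankKey design p < rankKey design m
          · simp [hlt]
          · simp [hlt]
        have h2 : argStep design max_block_size (some m) p
            = if rankKey design p < rankKey design m then some p else some m := by
          simp [argStep, hg, List.argAux]
        rw [h1, h2]
        refine ih _ hpw.2 ?_
        intro m' hm' q hq
        by_cases hlt : rankKey design p < rankKey design m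
        · rw [if_pos hlt] at hm'
          cases Option.some.inj hm'
          exact hpw.1 q hq
        · rw [if_neg hlt] at hm'
          cases Option.some.inj hm'
          exact hacc m rfl q (List.mem_cons_of_mem _ hq)
    · have h1 : stepC design max_block_size (enc design acc) p = enc design acc := by
        simp [stepC, hg]
      have h2 : argStep design max_block_size acc p = acc := by
        simp [argStep, hg]
      rw [h1, h2]
      exact ih _ hpw.2 (fun m hm q hq => hacc m hm q (List.mem_cons_of_mem _ hq))

lemma argfold_eq_argmin (design : List (List Int)) (max_block_size : Int)
    (l : List (Int × Int)) :
    l.foldl (argStep design max_block_size) none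
      = List.argmin (rankKey design) (l.filter (goodB design max_block_size)) := by
  unfold List.argmin
  rw [List.foldl_filter]
  rfl

-- ===== proof-layer: the flat index-pair list is strictly increasing =====

lemma pyRange_pw (a b : Int) : (PySem.List.pyRange a b 1).Pairwise (· < ·) := by
  generalize hn : (b - a).toNat = n
  induction n generalizing a with
  | zero =>
    rw [PySem.List.pyRange_one_eq_nil (by omega)]
    exact List.Pairwise.nil
  | succ n ih =>
    rw [PySem.List.pyRange_one_cons (by omega)]
    refine List.Pairwise.cons ?_ (ih (a + 1) (by omega))
    intro x hx
    rw [PySem.List.mem_pyRange_one] at hx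
    omega

lemma idxPairs_pw_aux (n a : Int) :
    (((PySem.List.pyRange a n 1).flatMap
      (fun i => (PySem.List.pyRange (i + 1) n 1).map (fun j => (i, j))))).Pairwise posLt := by
  generalize hn : (n - a).toNat = k
  induction k generalizing a with
  | zero =>
    rw [PySem.List.pyRange_one_eq_nil (by omega)]
    exact List.Pairwise.nil
  | succ k ih =>
    rw [PySem.List.pyRange_one_cons (by omega), List.flatMap_cons, List.pairwise_append]
    refine ⟨?_, ih (a + 1) (by omega), ?_⟩
    · rw [List.pairwise_map]
      refine (pyRange_pw (a + 1) n).imp ?_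
      intro x y hxy
      exact Or.inr ⟨rfl, hxy⟩
    · intro x hx y hy
      rw [List.mem_map] at hx
      obtain ⟨j, -, rfl⟩ := hx
      rw [List.mem_flatMap] at hy
      obtain ⟨i', hi', hy⟩ := hy
      rw [PySem.List.mem_pyRange_one] at hi'
      rw [List.mem_map] at hy
      obtain ⟨j', -, rfl⟩ := hy
      exact Or.inl (by omega)

lemma idxPairs_pw (n : Int) : (idxPairs n).Pairwise posLt := idxPairs_pw_aux n 0

-- ===== proof-layer: the scan over the sorted stream returns the same minimum =====

lemma argAux_stay (design : List (List Int)) (l : List (Int × Int)) (p : Int × Int)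
    (h : ∀ q ∈ l, ¬ (rankKey design q < rankKey design p)) :
    l.foldl (List.argAux (fun b c => rankKey design b < rankKey design c)) (some p)
      = some p := by
  induction l with
  | nil => rfl
  | cons q rest ih =>
    simp only [List.foldl_cons, List.argAux]
    rw [if_neg (h q List.mem_cons_self)]
    exact ih (fun r hr => h r (List.mem_cons_of_mem _ hr))

lemma argmin_cons_of_min (design : List (List Int)) (p : Int × Int) (l : List (Int × Int))
    (h : ∀ q ∈ l, rankKey design p ≤ rankKey design q) :
    List.argmin (rankKey design) (p :: l) = some p := by
  unfold List.argmin
  simp only [List.foldl_cons, List.argAux]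
  exact argAux_stay design l p (fun q hq => not_lt.mpr (h q hq))

lemma scanB_eq (design : List (List Int)) (max_block_size : Int) (s : List (Int × Int))
    (hpw : s.Pairwise (fun a b => rankKey design a ≤ rankKey design b)) :
    scanB design (usedPairsB design) max_block_size s
      = (List.argmin (rankKey design) (s.filter (goodB design max_block_size))).map
          (candOf design) := by
  induction s with
  | nil => rfl
  | cons p rest ih =>
    rw [List.pairwise_cons] at hpw
    by_cases hg : goodB design max_block_size p = true
    · have hdis : PySem.Set.isdisjoint (PySem.Set.ofList (Lof design p)) (Rof design p)
          = true := by
        simp only [goodB, Bool.and_eq_true] at hg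
        exact hg.1.1
      have hsz : decide (PySem.List.len (Lof design p) + PySem.List.len (Rof design p)
          > max_block_size) = false := by
        simp only [goodB, Bool.and_eq_true, Bool.not_eq_true'] at hg
        exact hg.1.2
      have hany : ((Lof design p).any (fun a => (Rof design p).any (fun b =>
          PySem.Set.contains (usedPairsB design) (min a b, max a b)))) = false := by
        simp only [goodB, Bool.and_eq_true, Bool.not_eq_true'] at hg
        exact hg.2
      have hcs : scanB design (usedPairsB design) max_block_size (p :: rest)
          = some (p.1, p.2, mergedOf design p) := by
        obtain ⟨i, j⟩ := p
        simp only [scanB, Lof, Rof] at hdis hsz hany ⊢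
        rw [hdis]
        simp only [Bool.not_true, Bool.false_eq_true, if_false]
        rw [if_neg (of_decide_eq_false hsz)]
        rw [hany]
        simp [mergedOf, Lof, Rof]
      rw [hcs]
      rw [List.filter_cons_of_pos hg]
      rw [argmin_cons_of_min design p _ ?side]
      · simp [candOf]
      case side =>
        intro q hq
        exact hpw.1 q (List.mem_of_mem_filter hq)
    · have hn : goodB design max_block_size p = false := Bool.eq_false_iff.mpr hg
      have hcs : scanB design (usedPairsB design) max_block_size (p :: rest)
          = scanB design (usedPairsB design) max_block_size rest := by
        obtain ⟨i, j⟩ := p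
        simp only [goodB, Lof, Rof] at hg
        simp only [scanB]
        by_cases hd : PySem.Set.isdisjoint (PySem.Set.ofList (PySem.List.pyGetD design i []))
            (PySem.List.pyGetD design j []) = true
        · simp only [hd, Bool.not_true, Bool.false_eq_true, if_false]
          by_cases hs : PySem.List.len (PySem.List.pyGetD design i []) +
              PySem.List.len (PySem.List.pyGetD design j []) > max_block_size
          · rw [if_pos hs]
          · rw [if_neg hs]
            by_cases ha : ((PySem.List.pyGetD design i []).any (fun a =>
                (PySem.List.pyGetD design j []).any (fun b =>
                  PySem.Set.contains (usedPairsB design) (min a b, max a b)))) = true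
            · simp only [ha, if_true]
            · exfalso
              apply hg
              rw [hd]
              simp only [Bool.true_and, Bool.and_eq_true, Bool.not_eq_true']
              exact ⟨decide_eq_false hs, Bool.eq_false_iff.mpr ha⟩
        · have hd' := Bool.eq_false_iff.mpr hd
          simp only [hd', Bool.not_false, if_true]
      rw [hcs, List.filter_cons_of_neg (by simp [hn]), ih hpw.2]

lemma argmin_inst (f : (Int × Int) → List Int) (l : List (Int × Int)) :
    List.argmin f l = @List.argmin _ _ _ LinearOrder.toDecidableLT f l := by
  congr

lemma argmin_perm (design : List (List Int)) (l1 l2 : List (Int × Int)) (h : l1.Perm l2) :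
    List.argmin (rankKey design) l1 = List.argmin (rankKey design) l2 := by
  rcases h1 : List.argmin (rankKey design) l1 with _ | m
  · rw [List.argmin_eq_none] at h1
    subst h1
    have h2 : l2 = [] := List.perm_nil.mp h.symm
    subst h2
    rfl
  · rcases h2 : List.argmin (rankKey design) l2 with _ | m'
    · rw [List.argmin_eq_none] at h2
      subst h2
      rw [List.perm_nil] at h
      subst h
      rw [show List.argmin (rankKey design) ([] : List (Int × Int)) = none from rfl] at h1
      cases h1
    · have h1' := h1
      have h2' := h2
      rw [argmin_inst] at h1' h2'
      have le1 : rankKey design m ≤ rankKey design m' :=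
        List.le_of_mem_argmin
          (h.mem_iff.mpr (List.argmin_mem (Option.mem_def.mpr h2))) (Option.mem_def.mpr h1')
      have le2 : rankKey design m' ≤ rankKey design m :=
        List.le_of_mem_argmin
          (h.symm.mem_iff.mpr (List.argmin_mem (Option.mem_def.mpr h1))) (Option.mem_def.mpr h2')
      rw [rank_inj design m m' (le_antisymm le1 le2)]

lemma sorted_inst (xs : List (Int × Int)) (key : (Int × Int) → List Int) :
    PySem.List.sorted xs key
      = @PySem.List.sorted _ _ List.instLinearOrder.toLT LinearOrder.toDecidableLT
          xs key false := by
  congr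

lemma enc_fst (design : List (List Int)) (x : Option (Int × Int)) :
    (enc design x).1 = x.map (candOf design) := by
  cases x <;> rfl

-- ===== VERDICT =====
theorem best_merge_candidate_py_spec : Claim_equal_best_merge_candidate_py := by
  intro design max_block_size _
  unfold Spec_best_merge_candidate_py
  have hA := AINV design max_block_size (idxPairs (PySem.List.len design)) none
    (idxPairs_pw _) (fun m hm => by cases hm)
  rw [A_flat, show ((none, none) : Option (Int × Int × List Int) ×
      Option (Int × Int × Int × List Int)) = enc design none from rfl, hA, enc_fst,
    argfold_eq_argmin]
  have hBpw : (PySem.List.sorted (idxPairs (PySem.List.len design))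
      (rankKey design)).Pairwise (fun a b => rankKey design a ≤ rankKey design b) := by
    rw [sorted_inst]
    exact PySem.List.sorted_pairwise _ _
  show _ = scanB design (usedPairsB design) max_block_size
    (PySem.List.sorted (idxPairs (PySem.List.len design)) (rankKey design))
  rw [scanB_eq design max_block_size _ hBpw]
  congr 1
  exact argmin_perm design _ _ (((PySem.List.sorted_perm _ _ _).symm).filter _)
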